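-- pv_equiv track=rewrite | github.com/ddr4869/backjoon | 프로그래머스/Lv.2/12923. 숫자 블록/숫자 블록.py | calc
-- ===== SOURCE A (Python) =====
-- import math
--
-- def calc(num):
--     if num==1: return 0
--     end=int(math.sqrt(num)//1)
--     max=1
--     for i in range(2,end+1):
--         if num%i == 0:
--             max=i
--             if num//i<=10000000:
--                 return num//i
--     return max
-- ===== SOURCE B (Python) =====
-- def calc(num):
--     if num == 1:
--         return 0
--     cap = min(10_000_000, num - 1)
--     for d in range(cap, 0, -1):
--         if num % d == 0:
--             return d
-- ===== Notes on version B (the rewrite author's own statement) =====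
-- stated objective: simpler
-- what changed: Replaced the sqrt-bounded trial-division loop that returns a complementary quotient (and falls back to the largest small divisor) by a single descending scan over candidate answers d = min(10^7, num-1) .. 1 returning the first divisor, i.e. directly the largest proper divisor <= 10^7.
-- outside the precondition, e.g. on calc(0): A returns 1, B returns None
import Mathlib
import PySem

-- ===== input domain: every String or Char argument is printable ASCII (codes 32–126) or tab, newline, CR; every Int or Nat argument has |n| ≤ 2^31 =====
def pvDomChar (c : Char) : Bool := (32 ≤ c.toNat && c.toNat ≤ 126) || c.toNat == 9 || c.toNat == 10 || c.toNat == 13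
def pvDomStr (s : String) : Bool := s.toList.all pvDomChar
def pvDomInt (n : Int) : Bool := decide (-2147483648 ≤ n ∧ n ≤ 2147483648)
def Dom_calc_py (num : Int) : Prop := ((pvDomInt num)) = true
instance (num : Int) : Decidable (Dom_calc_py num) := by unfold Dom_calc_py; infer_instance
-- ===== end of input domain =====

-- B replaces A's sqrt-bounded trial division (returning complementary quotients) by a plain
-- descending scan over candidate divisors min(10^7, num-1)..1 — simpler, not faster.


-- ===== PORT A =====
-- the 'for i in range(2, end+1)' loop with accumulator `max` (here m) and the early return
def calcA_loop (num e i m : Int) : Int :=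
  if e < i then m
  else if PySem.Int.mod num i = 0 then
    if PySem.Int.floordiv num i ≤ 10000000 then PySem.Int.floordiv num i
    else calcA_loop num e (i + 1) i
  else calcA_loop num e (i + 1) m
termination_by (e + 1 - i).toNat
decreasing_by all_goals omega

def calc_py (num : Int) : Int :=
  if num = 1 then 0
  else
    -- int(math.sqrt(num)//1): for 0 ≤ num ≤ 2^31 the correctly-rounded double sqrt cannot
    -- cross an integer, so this equals the integer square root (exact on Dom ∩ Pre_)
    let e : Int := Int.ofNat (Nat.sqrt num.toNat)
    calcA_loop num e 2 1

-- ===== PORT B =====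
-- 'for d in range(cap, 0, -1): if num % d == 0: return d'; the 0 on exhaustion is the
-- (for num ≥ 2 unreachable, since d = 1 divides) fall-off-the-end case
def calcB_loop (num d : Int) : Int :=
  if d ≤ 0 then 0
  else if PySem.Int.mod num d = 0 then d
  else calcB_loop num (d - 1)
termination_by d.toNat
decreasing_by omega

def calc_py_alt (num : Int) : Int :=
  if num = 1 then 0
  else calcB_loop num (min 10000000 (num - 1))

-- ===== PRECONDITION & SPEC =====
-- Pre_ excludes num < 1: on negative num A raises ValueError (math.sqrt), and at num = 0
-- B's loop is empty so B returns no int value (Python None); every positive integer divides 0,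
-- so no largest divisor exists there and neither behaviour is specified.
def Pre_calc_py (num : Int) : Prop := 1 ≤ num
instance (num : Int) : Decidable (Pre_calc_py num) := by unfold Pre_calc_py; infer_instance
def pvWitness_calc_py : Int := 12

def Spec_calc_py (num : Int) (out : Int) : Prop := out = calc_py_alt num
instance (num : Int) (out : Int) : Decidable (Spec_calc_py num out) := by unfold Spec_calc_py; infer_instance

-- ===== CLAIM (what is proved, stated in full; the proofs are below) =====
def Claim_equal_calc_py : Prop := ∀ (num : Int), Dom_calc_py num → Pre_calc_py num → Spec_calc_py num (calc_py num)

-- ===== LEMMAS AND PROOFS =====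

-- B's loop returns the largest divisor of num that is ≤ d (for 1 ≤ d)
theorem calcB_loop_char (num : Int) :
    ∀ d : Int, 1 ≤ d →
      (calcB_loop num d) ∣ num ∧ 1 ≤ calcB_loop num d ∧ calcB_loop num d ≤ d ∧
      ∀ x, calcB_loop num d < x → x ≤ d → ¬ x ∣ num := by
  intro d hd
  induction d, hd using Int.le_induction with
  | base =>
    rw [calcB_loop]
    simp
    intro x hx1 hx2 _; omega
  | succ d hd ih =>
    have hd1 : 1 ≤ d := hd
    rw [calcB_loop]
    have hpos : ¬ (d + 1 ≤ 0) := by omega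
    by_cases hmod : PySem.Int.mod num (d + 1) = 0
    · simp only [hpos, if_false, hmod, if_true]
      refine ⟨(PySem.Int.mod_eq_zero_iff_dvd _ _).1 hmod, by omega, le_refl _, ?_⟩
      intro x hx1 hx2; omega
    · simp only [hpos, if_false, hmod]
      have hds : d + 1 - 1 = d := by ring
      rw [hds]
      obtain ⟨a, b, c, hmax⟩ := ih
      refine ⟨a, b, by omega, ?_⟩
      intro x hx1 hx2
      rcases lt_or_eq_of_le hx2 with h | h
      · exact hmax x hx1 (by omega)
      · subst h
        rw [← PySem.Int.mod_eq_zero_iff_dvd]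
        exact hmod

-- a proper divisor g of num has a complementary divisor j ≥ 2 with num / j = g
theorem comp_div (num g : Int) (hnum : 2 ≤ num) (hg1 : g ∣ num) (hg2 : 1 ≤ g) (hg3 : g ≤ num - 1) :
    ∃ j : Int, num = j * g ∧ 2 ≤ j ∧ j ∣ num ∧ num / j = g := by
  obtain ⟨j, hj⟩ := hg1
  have hjpos : 1 ≤ j := by nlinarith
  have hj2 : 2 ≤ j := by
    rcases lt_or_eq_of_le hjpos with h | h
    · omega
    · exfalso; rw [← h] at hj; omega
  refine ⟨j, by linarith [hj], hj2, ⟨g, by linarith [hj, mul_comm g j]⟩, ?_⟩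
  rw [hj, mul_comm g j]
  exact Int.mul_ediv_cancel_left g (by omega)

-- A's loop returns g, the largest divisor of num that is ≤ min(10^7, num-1),
-- under the loop invariant on (i, m)
theorem calcA_loop_eq (num e g : Int)
    (hnum : 2 ≤ num)
    (he1 : e * e ≤ num) (he2 : num < (e + 1) * (e + 1))
    (hcap : e ≤ min 10000000 (num - 1))
    (hg1 : g ∣ num) (hg2 : 1 ≤ g) (hg3 : g ≤ min 10000000 (num - 1))
    (hgmax : ∀ x, g < x → x ≤ min 10000000 (num - 1) → ¬ x ∣ num) :
    ∀ n : Nat, ∀ i m : Int, (e + 1 - i).toNat = n →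
      2 ≤ i → m ∣ num → 1 ≤ m → m < i → m ≤ e →
      (∀ x, m < x → x < i → ¬ x ∣ num) →
      (∀ j, 2 ≤ j → j < i → j ∣ num → ¬ (num / j ≤ 10000000)) →
      calcA_loop num e i m = g := by
  intro n
  induction n using Nat.strong_induction_on with
  | _ n ih =>
    intro i m hn hi hm1 hm2 hm3 hm4 hmmax hnoret
    have he0 : 1 ≤ e := by nlinarith
    rw [calcA_loop]
    by_cases hie : e < i
    · -- loop finished: returns m; show m = g
      simp only [hie, if_true]
      have hmcap : m ≤ min 10000000 (num - 1) := by omega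
      have hmg : m ≤ g := by
        by_contra h
        exact hgmax m (by omega) hmcap hm1
      rcases lt_or_eq_of_le hmg with hlt | heq
      · exfalso
        by_cases hge : g ≤ e
        · exact hmmax g hlt (by omega) hg1
        · -- g > e: its complementary divisor j ≤ e would have returned earlier
          obtain ⟨j, hjmul, hj2, hjdvd, hjq⟩ := comp_div num g hnum hg1 hg2 (by omega)
          have hje : j ≤ e := by nlinarith
          have := hnoret j hj2 (by omega) hjdvd
          rw [hjq] at this
          omega
      · exact heq
    · have hile : i ≤ e := by omega
      simp only [hie, if_false]
      by_cases hmod : PySem.Int.mod num i = 0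
      · have hidvd : i ∣ num := (PySem.Int.mod_eq_zero_iff_dvd _ _).1 hmod
        have hfd : PySem.Int.floordiv num i = num / i :=
          PySem.Int.floordiv_eq_ediv_of_pos (by omega)
        obtain ⟨q, hq⟩ := hidvd
        have hqdiv : num / i = q := by rw [hq]; exact Int.mul_ediv_cancel_left q (by omega)
        have hq1 : 1 ≤ q := by nlinarith
        have hqe : e ≤ q := by nlinarith
        have hqcapn : q ≤ num - 1 := by nlinarith
        have hqdvd : q ∣ num := ⟨i, by linarith [hq, mul_comm i q]⟩
        simp only [hmod, if_true, hfd, hqdiv]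
        by_cases hret : q ≤ 10000000
        · simp only [hret, if_true]
          -- the returned quotient q is exactly g
          have hqg : q ≤ g := by
            by_contra h
            exact hgmax q (by omega) (by omega) hqdvd
          rcases lt_or_eq_of_le hqg with hlt | heq
          · exfalso
            by_cases hge : g ≤ e
            · omega
            · obtain ⟨j, hjmul, hj2, hjdvd, hjq⟩ := comp_div num g hnum hg1 hg2 (by omega)
              have hji : j < i := by nlinarith
              have := hnoret j hj2 hji hjdvd
              rw [hjq] at this
              omega
          · exact heq
        · simp only [hret, if_false]
          refine ih (e + 1 - (i + 1)).toNat (by omega) (i + 1) i (by omega) (by omega)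
            ⟨q, hq⟩ (by omega) (by omega) (by omega) ?_ ?_
          · intro x hx1 hx2; omega
          · intro j hj2 hji hjdvd
            by_cases hjlt : j < i
            · exact hnoret j hj2 hjlt hjdvd
            · have : j = i := by omega
              subst this
              rw [hqdiv]
              omega
      · have hindvd : ¬ i ∣ num := fun h => hmod ((PySem.Int.mod_eq_zero_iff_dvd _ _).2 h)
        simp only [hmod, if_false]
        refine ih (e + 1 - (i + 1)).toNat (by omega) (i + 1) m (by omega) (by omega)
          hm1 (by omega) (by omega) (by omega) ?_ ?_
        · intro x hx1 hx2
          by_cases hxi : x < i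
          · exact hmmax x hx1 hxi
          · have : x = i := by omega
            subst this; exact hindvd
        · intro j hj2 hji hjdvd
          have : j < i := by
            rcases lt_or_eq_of_le (by omega : j ≤ i) with h | h
            · exact h
            · exfalso; subst h; exact hindvd hjdvd
          exact hnoret j hj2 this hjdvd

-- ===== VERDICT (by name: the statement is the Claim_ definition above) =====
theorem calc_py_spec : Claim_equal_calc_py := by
  intro num hdom hpre
  unfold Dom_calc_py pvDomInt at hdom
  simp only [decide_eq_true_eq] at hdom
  unfold Pre_calc_py at hpre
  unfold Spec_calc_py calc_py calc_py_alt
  by_cases h1 : num = 1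
  · simp [h1]
  · have h2 : 2 ≤ num := by omega
    simp only [h1, if_false]
    set e : Int := Int.ofNat (Nat.sqrt num.toNat) with hedef
    have hcast : ((num.toNat : Int)) = num := Int.toNat_of_nonneg (by omega)
    have he1 : e * e ≤ num := by
      have := Nat.sqrt_le num.toNat
      rw [hedef]
      exact_mod_cast hcast ▸ (by exact_mod_cast this : ((Nat.sqrt num.toNat * Nat.sqrt num.toNat : Nat) : Int) ≤ (num.toNat : Int))
    have he2 : num < (e + 1) * (e + 1) := by
      have h := Nat.lt_succ_sqrt num.toNat
      have h' : ((num.toNat : Nat) : Int) < (((Nat.sqrt num.toNat + 1) * (Nat.sqrt num.toNat + 1) : Nat) : Int) := by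
        exact_mod_cast h
      rw [hcast] at h'
      rw [hedef]
      push_cast at h'
      exact h'
    have he0 : 1 ≤ e := by nlinarith
    have hcap : e ≤ min 10000000 (num - 1) := by
      have hub : e ≤ 10000000 := by nlinarith
      have hlb : e ≤ num - 1 := by nlinarith
      omega
    have hcap1 : 1 ≤ min 10000000 (num - 1) := by omega
    obtain ⟨hg1, hg2, hg3, hgmax⟩ := calcB_loop_char num (min 10000000 (num - 1)) hcap1
    exact (calcA_loop_eq num e (calcB_loop num (min 10000000 (num - 1))) h2 he1 he2 hcap
      hg1 hg2 hg3 hgmax (e + 1 - 2).toNat 2 1 rfl (le_refl 2) (one_dvd num) (le_refl 1)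
      (by omega) he0 (by intro x hx1 hx2; omega) (by intro j hj2 hji _; omega))
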